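-- pv_equiv track=rewrite | github.com/Ahmed-Fawzy14/RISC-V-RV32I-Simulator | Tests/testcase1.py | extract_registers
-- ===== SOURCE A (Python) =====
-- def extract_registers(output):
--     """Extract the final register values from the simulator output."""
--     registers = [0] * 32
--     lines = output.splitlines()
--
--     # Flag to indicate we are in the "Decimal" section
--     in_decimal_section = False
--
--     for line in lines:
--         # Skip header lines
--         if "Decimal:" in line:
--             in_decimal_section = True
--             continue
--         if "Binary:" in line or "Hexadecimal:" in line:
--             in_decimal_section = False
--             continue
--
--         # Only process lines after "Decimal:" header
--         if in_decimal_section and "x" in line: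
--             parts = line.split("|")
--             for part in parts:
--                 try:
--                     reg, value = part.strip().split(":")
--                     reg_num = int(reg[1:])  # Extract register number (e.g., x1 -> 1)
--                     value = value.strip()
--
--                     # Convert the value to an integer based on its format
--                     if value.startswith("0b"):
--                         registers[reg_num] = int(value, 2)  # Binary
--                     elif value.startswith("0x"):
--                         registers[reg_num] = int(value, 16)  # Hexadecimal
--                     else:
--                         registers[reg_num] = int(value)  # Decimal
--                 except ValueError:
--                     # Skip lines that do not match the expected format
--                     continue
--     return registers
-- ===== SOURCE B (Python) =====
-- def extract_registers(output):
--     """Extract the final register values from the simulator output."""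
--     lines = output.splitlines()
--     # Locate every section-header line; each decimal section is the span of
--     # lines between its header and the next header (or the end of the output).
--     starts = [i for i, l in enumerate(lines)
--               if "Decimal:" in l or "Binary:" in l or "Hexadecimal:" in l]
--     ends = starts[1:] + [len(lines)]
--     parts = [p
--              for i, e in zip(starts, ends) if "Decimal:" in lines[i]
--              for l in lines[i + 1:e] if "x" in l
--              for p in l.split("|")]
--     registers = [0] * 32
--     for part in parts:
--         try:
--             reg, value = part.strip().split(":")
--             value = value.strip()
--             val = (int(value, 2) if value.startswith("0b")
--                    else int(value, 16) if value.startswith("0x")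
--                    else int(value))
--             registers[int(reg[1:])] = val
--         except ValueError:
--             continue
--     return registers
-- ===== Notes on version B (the rewrite author's own statement) =====
-- stated objective: alternative
-- what changed: A's flag-driven line-by-line state machine is replaced by index arithmetic: B lists the header line numbers, pairs each decimal header with the next header to obtain the section spans, flattens all register cells of those spans into one list via comprehensions, and fills the register file from that flat list (conditional-expression base dispatch instead of A's branch chain).
import Mathlib
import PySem

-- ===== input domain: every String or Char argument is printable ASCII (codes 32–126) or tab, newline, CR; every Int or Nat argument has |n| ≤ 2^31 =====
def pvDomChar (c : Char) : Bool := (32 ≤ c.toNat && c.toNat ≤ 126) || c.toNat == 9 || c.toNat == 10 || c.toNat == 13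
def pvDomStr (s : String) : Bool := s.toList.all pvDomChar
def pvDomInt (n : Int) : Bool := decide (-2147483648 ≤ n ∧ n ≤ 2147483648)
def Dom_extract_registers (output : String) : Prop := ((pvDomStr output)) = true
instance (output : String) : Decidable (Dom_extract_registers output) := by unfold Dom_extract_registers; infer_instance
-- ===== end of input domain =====

-- B replaces A's single flag-driven line loop by index arithmetic over the header
-- positions: it lists the header line numbers, pairs each decimal header with the next
-- header (section spans), flattens all register cells of those spans into one list and
-- fills the register file from it; same return value, same cost.

-- ===== PORT A =====
-- A's inner per-part body (the try/except block of A's nested loop)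
def pvPartStepA (regs : List Int) (part : String) : List Int :=
  match PySem.Str.split? (PySem.Str.strip part) ":" with
  | some [reg, value0] =>
    match PySem.Int.ofStr? (PySem.Str.slice reg (some 1) none) with
    | none => regs              -- ValueError on int(reg[1:]) → continue
    | some reg_num =>
      let value := PySem.Str.strip value0
      if PySem.Str.startswith value "0b" then
        match PySem.Int.ofStrBase? value 2 with
        | some v => PySem.List.pySetD regs reg_num v
        | none => regs
      else if PySem.Str.startswith value "0x" then
        match PySem.Int.ofStrBase? value 16 with
        | some v => PySem.List.pySetD regs reg_num v
        | none => regs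
      else
        match PySem.Int.ofStr? value with
        | some v => PySem.List.pySetD regs reg_num v
        | none => regs
  | _ => regs                   -- ValueError on the 2-tuple unpacking → continue

-- A's per-line body (state = (registers, in_decimal_section))
def pvLineStepA : List Int × Bool → String → List Int × Bool
  | (regs, flag), line =>
    if PySem.Str.isIn "Decimal:" line = true then (regs, true)
    else if (PySem.Str.isIn "Binary:" line || PySem.Str.isIn "Hexadecimal:" line) = true then (regs, false)
    else if (flag && PySem.Str.isIn "x" line) = true then
      (((PySem.Str.split? line "|").getD []).foldl pvPartStepA regs, flag)
    else (regs, flag)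

def extract_registers (output : String) : List Int :=
  ((PySem.Str.splitlines output).foldl pvLineStepA (List.replicate 32 0, false)).1

-- ===== PORT B =====
-- "Decimal:" in l or "Binary:" in l or "Hexadecimal:" in l
def pvIsHdrB (l : String) : Bool :=
  PySem.Str.isIn "Decimal:" l || PySem.Str.isIn "Binary:" l || PySem.Str.isIn "Hexadecimal:" l

-- B's try/except body of the final fill loop (conditional-expression base dispatch)
def pvCellStepB (regs : List Int) (part : String) : List Int :=
  match PySem.Str.split? (PySem.Str.strip part) ":" with
  | some [reg, value0] =>
    let value := PySem.Str.strip value0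
    let v? := if PySem.Str.startswith value "0b" then PySem.Int.ofStrBase? value 2
              else if PySem.Str.startswith value "0x" then PySem.Int.ofStrBase? value 16
              else PySem.Int.ofStr? value
    match v?, PySem.Int.ofStr? (PySem.Str.slice reg (some 1) none) with
    | some v, some n => PySem.List.pySetD regs n v
    | _, _ => regs
  | _ => regs

def extract_registers_alt (output : String) : List Int :=
  let lines := PySem.Str.splitlines output
  -- starts = [i for i, l in enumerate(lines) if <header>]
  let starts : List Int := (PySem.List.enumerate lines).filterMap
    (fun p => if pvIsHdrB p.2 then some p.1 else none)
  -- ends = starts[1:] + [len(lines)]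
  let ends : List Int := starts.tail ++ [(lines.length : Int)]
  -- parts = [p for i, e in zip(starts, ends) if "Decimal:" in lines[i]
  --            for l in lines[i+1:e] if "x" in l for p in l.split("|")]
  -- (lines[i] via pyGetD: every start index is a valid index of lines)
  let parts : List String := (starts.zip ends).flatMap (fun pe =>
    if PySem.Str.isIn "Decimal:" (PySem.List.pyGetD lines pe.1 "") then
      ((PySem.List.slice lines (some (pe.1 + 1)) (some pe.2)).filter
        (fun l => PySem.Str.isIn "x" l)).flatMap
        (fun l => (PySem.Str.split? l "|").getD [])
    else [])
  parts.foldl pvCellStepB (List.replicate 32 0)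

-- ===== PRECONDITION & SPEC =====
-- register number of a cell whose register AND value both parse (only then does the
-- Python reach the registers[reg_num] indexing)
def pvRegNum? (part : String) : Option Int :=
  match PySem.Str.split? (PySem.Str.strip part) ":" with
  | some [reg, value0] =>
    match PySem.Int.ofStr? (PySem.Str.slice reg (some 1) none) with
    | some n =>
      let value := PySem.Str.strip value0
      if (if PySem.Str.startswith value "0b" then PySem.Int.ofStrBase? value 2
          else if PySem.Str.startswith value "0x" then PySem.Int.ofStrBase? value 16
          else PySem.Int.ofStr? value).isSome then some n else none
    | none => none
  | _ => none

-- the lines of the decimal section(s) that A parses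
def pvDecLines : List String → Bool → List String
  | [], _ => []
  | l :: ls, flag =>
    if PySem.Str.isIn "Decimal:" l = true then pvDecLines ls true
    else if (PySem.Str.isIn "Binary:" l || PySem.Str.isIn "Hexadecimal:" l) = true then pvDecLines ls false
    else if (flag && PySem.Str.isIn "x" l) = true then l :: pvDecLines ls flag
    else pvDecLines ls flag

-- Pre_ excludes exactly the inputs where the Python A raises an uncaught IndexError: a
-- well-formed cell in the decimal section whose register number is outside Python's index
-- range [-32, 32) of the 32-entry register list.  A returns on every other input (B
-- raises the same IndexError there).
def Pre_extract_registers (output : String) : Prop :=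
  ∀ n ∈ (pvDecLines (PySem.Str.splitlines output) false).flatMap
          (fun l => ((PySem.Str.split? l "|").getD []).filterMap pvRegNum?),
    PySem.Raise.InRange 32 n

instance (output : String) : Decidable (Pre_extract_registers output) := by
  unfold Pre_extract_registers; infer_instance

def pvWitness_extract_registers : String := "Decimal:\nx1: 5 | x2: 0b11\nx31: 0x10"

def Spec_extract_registers (output : String) (out : List Int) : Prop := out = extract_registers_alt output
instance (output : String) (out : List Int) : Decidable (Spec_extract_registers output out) := by unfold Spec_extract_registers; infer_instance

-- ===== CLAIM (what is proved, stated in full; the proofs are below) =====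
def Claim_equal_extract_registers : Prop := ∀ (output : String), Dom_extract_registers output → Pre_extract_registers output → Spec_extract_registers output (extract_registers output)

-- ===== LEMMAS AND PROOFS =====

-- proof-only helpers: Nat-valued header positions and B's selection, in closed form
def pvNatStarts : List String → List Nat
  | [] => []
  | l :: ls => if pvIsHdrB l then 0 :: (pvNatStarts ls).map (· + 1) else (pvNatStarts ls).map (· + 1)

def pvSegF (xs : List String) (a b : Nat) : List String :=
  if PySem.Str.isIn "Decimal:" (xs.getD a "") then
    ((xs.drop (a + 1)).take (b - (a + 1))).filter (fun l => PySem.Str.isIn "x" l)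
  else []

def pvSelB (ls : List String) : List String :=
  ((pvNatStarts ls).zip ((pvNatStarts ls).tail ++ [ls.length])).flatMap
    (fun pe => pvSegF ls pe.1 pe.2)

-- A's cell body = B's cell body
theorem pvCellStep_eq (regs : List Int) (part : String) :
    pvPartStepA regs part = pvCellStepB regs part := by
  unfold pvPartStepA pvCellStepB
  rcases hsp : PySem.Str.split? (PySem.Str.strip part) ":" with _ | ps
  · rfl
  · rcases ps with _ | ⟨r, _ | ⟨v, _ | ⟨w, rest⟩⟩⟩
    · rfl
    · rfl
    case cons.cons.cons => rfl
    simp only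
    rcases ho : PySem.Int.ofStr? (PySem.Str.slice r (some 1) none) with _ | n
    · by_cases hb : PySem.Str.startswith (PySem.Str.strip v) "0b" = true
      · simp only [if_pos hb]
        rcases PySem.Int.ofStrBase? (PySem.Str.strip v) 2 with _ | w <;> rfl
      · simp only [if_neg hb]
        by_cases hx : PySem.Str.startswith (PySem.Str.strip v) "0x" = true
        · simp only [if_pos hx]
          rcases PySem.Int.ofStrBase? (PySem.Str.strip v) 16 with _ | w <;> rfl
        · simp only [if_neg hx]
          rcases PySem.Int.ofStr? (PySem.Str.strip v) with _ | w <;> rfl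
    · simp only
      by_cases hb : PySem.Str.startswith (PySem.Str.strip v) "0b" = true
      · simp only [if_pos hb]
        rcases PySem.Int.ofStrBase? (PySem.Str.strip v) 2 with _ | w <;> rfl
      · simp only [if_neg hb]
        by_cases hx : PySem.Str.startswith (PySem.Str.strip v) "0x" = true
        · simp only [if_pos hx]
          rcases PySem.Int.ofStrBase? (PySem.Str.strip v) 16 with _ | w <;> rfl
        · simp only [if_neg hx]
          rcases PySem.Int.ofStr? (PySem.Str.strip v) with _ | w <;> rfl

-- Int starts = Nat starts, shifted
theorem pvStarts_eq (ls : List String) (s : Int) :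
    (PySem.List.enumerate ls s).filterMap (fun p => if pvIsHdrB p.2 then some p.1 else none)
      = (pvNatStarts ls).map (fun (k : Nat) => s + (k : Int)) := by
  induction ls generalizing s with
  | nil => simp [pvNatStarts, PySem.List.enumerate_nil]
  | cons l ls ih =>
    rw [PySem.List.enumerate_cons, List.filterMap_cons]
    by_cases h : pvIsHdrB l = true
    · simp only [h, if_true, ih (s + 1), pvNatStarts, List.map_cons, List.map_map]
      congr 1
      · simp
      · refine List.map_congr_left fun k _ => ?_
        simp only [Function.comp_apply]
        push_cast; ring
    · simp only [h, Bool.false_eq_true, if_false, ih (s + 1), pvNatStarts, List.map_map]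
      refine List.map_congr_left fun k _ => ?_
      simp only [Function.comp_apply]
      push_cast; ring

-- shift invariance of the segment reader
theorem pvSegF_shift (ls : List String) (l : String) (a b : Nat) :
    pvSegF (l :: ls) (a + 1) (b + 1) = pvSegF ls a b := by
  simp [pvSegF, List.drop_succ_cons, Nat.succ_sub_succ]


theorem pvSelB_shift_aux (l : String) (ls : List String) (ps : List (Nat × Nat)) :
    (ps.map (Prod.map (· + 1) (· + 1))).flatMap (fun pe => pvSegF (l :: ls) pe.1 pe.2)
      = ps.flatMap (fun pe => pvSegF ls pe.1 pe.2) := by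
  induction ps with
  | nil => rfl
  | cons p ps ih => simp [List.flatMap_cons, ih, Prod.map, pvSegF_shift]

theorem pvNatStarts_nil_takeWhile (ls : List String) (h : pvNatStarts ls = []) :
    ls.takeWhile (fun s => !pvIsHdrB s) = ls := by
  induction ls with
  | nil => rfl
  | cons l ls ih =>
    by_cases hl : pvIsHdrB l = true
    · simp [pvNatStarts, hl] at h
    · simp only [pvNatStarts, hl, Bool.false_eq_true, if_false, List.map_eq_nil_iff] at h
      simp [hl, ih h]

theorem pvNatStarts_head_take (ls : List String) (k : Nat) (ks : List Nat)
    (h : pvNatStarts ls = k :: ks) : ls.take k = ls.takeWhile (fun s => !pvIsHdrB s) := by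
  induction ls generalizing k ks with
  | nil => simp [pvNatStarts] at h
  | cons l ls ih =>
    by_cases hl : pvIsHdrB l = true
    · simp only [pvNatStarts, hl, if_true, List.cons.injEq] at h
      simp [← h.1, hl]
    · simp only [pvNatStarts, hl, Bool.false_eq_true, if_false] at h
      rcases hns : pvNatStarts ls with _ | ⟨k0, ks0⟩
      · rw [hns] at h; simp at h
      · rw [hns] at h
        simp only [List.map_cons, List.cons.injEq] at h
        rw [← h.1]
        simp [hl, List.take_succ_cons, ih k0 ks0 hns]

theorem pvSelB_cons_nohdr (l : String) (ls : List String) (h : pvIsHdrB l = false) :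
    pvSelB (l :: ls) = pvSelB ls := by
  have hts : pvNatStarts (l :: ls) = (pvNatStarts ls).map (· + 1) := by
    simp [pvNatStarts, h]
  unfold pvSelB
  rw [hts, List.length_cons, ← List.map_tail,
      show [ls.length + 1] = [ls.length].map (· + 1) by simp,
      ← List.map_append, List.zip_map, pvSelB_shift_aux]

theorem pvSelB_cons_hdr (l : String) (ls : List String) (h : pvIsHdrB l = true) :
    pvSelB (l :: ls)
      = (if PySem.Str.isIn "Decimal:" l then
           (ls.takeWhile (fun s => !pvIsHdrB s)).filter (fun s => PySem.Str.isIn "x" s)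
         else []) ++ pvSelB ls := by
  have hts : pvNatStarts (l :: ls) = 0 :: (pvNatStarts ls).map (· + 1) := by
    simp [pvNatStarts, h]
  unfold pvSelB
  rw [hts, List.length_cons]
  rcases hns : pvNatStarts ls with _ | ⟨k, ks⟩
  · simp only [List.map_nil, List.tail_cons, List.nil_append, List.zip_cons_cons,
      List.flatMap_cons]
    rw [pvNatStarts_nil_takeWhile ls hns]
    simp [pvSegF]
  · simp only [List.map_cons, List.tail_cons, List.cons_append, List.zip_cons_cons,
      List.flatMap_cons]
    have h1 : pvSegF (l :: ls) 0 (k + 1)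
        = (if PySem.Str.isIn "Decimal:" l then
             (ls.takeWhile (fun s => !pvIsHdrB s)).filter (fun s => PySem.Str.isIn "x" s)
           else []) := by
      rw [← pvNatStarts_head_take ls k ks hns]
      simp [pvSegF]
    have h2 : (((k + 1) :: ks.map (· + 1)).zip (ks.map (· + 1) ++ [ls.length + 1])).flatMap
          (fun pe => pvSegF (l :: ls) pe.1 pe.2)
        = ((k :: ks).zip (ks ++ [ls.length])).flatMap (fun pe => pvSegF ls pe.1 pe.2) := by
      rw [show ks.map (· + 1) ++ [ls.length + 1] = (ks ++ [ls.length]).map (· + 1) by simp,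
          show ((k + 1) :: ks.map (· + 1)) = (k :: ks).map (· + 1) by simp,
          List.zip_map, pvSelB_shift_aux]
    rw [h1, h2]

-- A's state machine selects exactly B's spans
theorem pvDecLines_eq_selB (ls : List String) (flag : Bool) :
    pvDecLines ls flag
      = (if flag then (ls.takeWhile (fun s => !pvIsHdrB s)).filter (fun s => PySem.Str.isIn "x" s)
         else []) ++ pvSelB ls := by
  induction ls generalizing flag with
  | nil =>
    simp [pvDecLines, pvSelB, pvNatStarts]
  | cons l ls ih =>
    by_cases hd : PySem.Str.isIn "Decimal:" l = true
    · have hh : pvIsHdrB l = true := by simp only [pvIsHdrB, hd, Bool.true_or]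
      rw [show pvDecLines (l :: ls) flag = pvDecLines ls true by
            simp only [pvDecLines]; rw [if_pos hd],
          ih true, pvSelB_cons_hdr l ls hh, if_pos hd,
          show (l :: ls).takeWhile (fun s => !pvIsHdrB s) = [] by simp [hh]]
      cases flag <;> simp
    · by_cases hbh : (PySem.Str.isIn "Binary:" l || PySem.Str.isIn "Hexadecimal:" l) = true
      · have hh : pvIsHdrB l = true := by
          rcases Bool.or_eq_true_iff.mp hbh with h1 | h1 <;>
            simp only [pvIsHdrB, h1, Bool.or_true, Bool.true_or]
        rw [show pvDecLines (l :: ls) flag = pvDecLines ls false by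
              simp only [pvDecLines]; rw [if_neg hd, if_pos hbh],
            ih false, pvSelB_cons_hdr l ls hh, if_neg hd,
            show (l :: ls).takeWhile (fun s => !pvIsHdrB s) = [] by simp [hh]]
        cases flag <;> simp
      · have hh : pvIsHdrB l = false := by
          simp only [Bool.or_eq_true_iff, not_or, Bool.not_eq_true] at hbh
          simp only [pvIsHdrB, Bool.or_eq_false_iff, Bool.not_eq_true] at *
          exact ⟨⟨by simpa using hd, hbh.1⟩, hbh.2⟩
        rw [pvSelB_cons_nohdr l ls hh,
            show (l :: ls).takeWhile (fun s => !pvIsHdrB s) = l :: ls.takeWhile (fun s => !pvIsHdrB s)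
              by simp [hh]]
        by_cases hx : PySem.Str.isIn "x" l = true
        · cases flag
          · rw [show pvDecLines (l :: ls) false = pvDecLines ls false by
                  simp only [pvDecLines]; rw [if_neg hd, if_neg hbh]
                  simp, ih false]
            simp
          · rw [show pvDecLines (l :: ls) true = l :: pvDecLines ls true by
                  simp only [pvDecLines]; rw [if_neg hd, if_neg hbh, if_pos (by simpa using hx)],
                ih true]
            simp [show PySem.Chars.isIn ['x'] l.toList = true by simpa using hx]
        · cases flag
          · rw [show pvDecLines (l :: ls) false = pvDecLines ls false by
                  simp only [pvDecLines]; rw [if_neg hd, if_neg hbh]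
                  simp, ih false]
            simp
          · rw [show pvDecLines (l :: ls) true = pvDecLines ls true by
                  simp only [pvDecLines]; rw [if_neg hd, if_neg hbh, if_neg (by simpa using hx)],
                ih true]
            simp [show PySem.Chars.isIn ['x'] l.toList = false by simpa using hx]

-- A's loop = fold over the selected lines
theorem pvA_fold (ls : List String) (regs : List Int) (flag : Bool) :
    (ls.foldl pvLineStepA (regs, flag)).1
      = (pvDecLines ls flag).foldl
          (fun r l => ((PySem.Str.split? l "|").getD []).foldl pvPartStepA r) regs := by
  induction ls generalizing regs flag with
  | nil => rfl
  | cons l ls ih =>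
    simp only [List.foldl_cons, pvLineStepA, pvDecLines]
    by_cases hd : PySem.Str.isIn "Decimal:" l = true
    · rw [if_pos hd, if_pos hd]; exact ih regs true
    · rw [if_neg hd, if_neg hd]
      by_cases hbh : (PySem.Str.isIn "Binary:" l || PySem.Str.isIn "Hexadecimal:" l) = true
      · rw [if_pos hbh, if_pos hbh]; exact ih regs false
      · rw [if_neg hbh, if_neg hbh]
        by_cases hx : (flag && PySem.Str.isIn "x" l) = true
        · rw [if_pos hx, if_pos hx, List.foldl_cons]
          exact ih _ flag
        · rw [if_neg hx, if_neg hx]; exact ih regs flag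

-- B's Int-indexed span comprehension = pvSelB's Nat closed form, cell-flattened
theorem pvB_parts (ls : List String) :
    ((((PySem.List.enumerate ls).filterMap (fun p => if pvIsHdrB p.2 then some p.1 else none)).zip
        ((((PySem.List.enumerate ls).filterMap (fun p => if pvIsHdrB p.2 then some p.1 else none)).tail)
          ++ [(ls.length : Int)])).flatMap (fun pe =>
      if PySem.Str.isIn "Decimal:" (PySem.List.pyGetD ls pe.1 "") then
        ((PySem.List.slice ls (some (pe.1 + 1)) (some pe.2)).filter
          (fun l => PySem.Str.isIn "x" l)).flatMap
          (fun l => (PySem.Str.split? l "|").getD [])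
      else []))
      = (pvSelB ls).flatMap (fun l => (PySem.Str.split? l "|").getD []) := by
  rw [pvStarts_eq ls 0,
      show (pvNatStarts ls).map (fun (k : Nat) => (0 : Int) + (k : Int))
          = (pvNatStarts ls).map (fun (k : Nat) => (k : Int)) by simp,
      ← List.map_tail,
      show [(ls.length : Int)] = ([ls.length] : List Nat).map (fun (k : Nat) => (k : Int)) by simp,
      ← List.map_append, List.zip_map, List.flatMap_map, pvSelB, List.flatMap_assoc]
  congr 1
  funext pe
  rcases pe with ⟨a, b⟩
  simp only [Prod.map, PySem.List.pyGetD_natCast,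
      show ((a : Int) + 1) = ((a + 1 : Nat) : Int) by push_cast; ring,
      PySem.List.slice_natCast, pvSegF]
  by_cases hdec : PySem.Str.isIn "Decimal:" (ls.getD a "") = true
  · rw [if_pos hdec, if_pos hdec]
  · rw [if_neg hdec, if_neg hdec]; rfl

theorem pvB_eq (output : String) :
    extract_registers_alt output
      = ((pvSelB (PySem.Str.splitlines output)).flatMap
          (fun l => (PySem.Str.split? l "|").getD [])).foldl pvCellStepB (List.replicate 32 0) := by
  unfold extract_registers_alt
  dsimp only
  rw [pvB_parts (PySem.Str.splitlines output)]

-- a fold over flattened cells = the nested fold over selected lines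
theorem pvFoldFlat (sel : List String) (init : List Int) :
    (sel.flatMap (fun l => (PySem.Str.split? l "|").getD [])).foldl pvCellStepB init
      = sel.foldl (fun r l => ((PySem.Str.split? l "|").getD []).foldl pvCellStepB r) init := by
  induction sel generalizing init with
  | nil => rfl
  | cons l sel ih => simp [List.flatMap_cons, List.foldl_append, ih]

-- ===== VERDICT (by name: the statement is the Claim_ definition above) =====
theorem extract_registers_spec : Claim_equal_extract_registers := by
  intro output _ _
  unfold Spec_extract_registers
  rw [pvB_eq, pvFoldFlat]
  unfold extract_registers
  rw [pvA_fold, pvDecLines_eq_selB]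
  simp only [Bool.false_eq_true, if_false, List.nil_append]
  rw [show pvPartStepA = pvCellStepB from funext fun a => funext fun b => pvCellStep_eq a b]
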